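-- pv_equiv track=rewrite | github.com/dair-iitd/OxKBC | utils.py | get_ent_ent_rel
-- ===== SOURCE A (Python) =====
-- def get_ent_ent_rel(data_arr):
--     e1_e2_r={}
--     e2_e1_r={}
--     for data in data_arr:
--         e1=data[0]
--         r=data[1]
--         e2=data[2]
--
--         if e1 not in e1_e2_r:
--             e1_e2_r[e1]={}
--         if e2 not in e2_e1_r:
--             e2_e1_r[e2]={}
--
--         if e2 not in e1_e2_r[e1]:
--             e1_e2_r[e1][e2]=[]
--         if e1 not in e2_e1_r[e2]:
--             e2_e1_r[e2][e1]=[]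
--
--         e1_e2_r[e1][e2].append(r)
--         e2_e1_r[e2][e1].append(r)
--     return e1_e2_r,e2_e1_r
-- ===== SOURCE B (Python) =====
-- def get_ent_ent_rel(data_arr):
--     # Declarative group-by: dedupe keys in first-occurrence order, then gather
--     # each relation list by filtering, instead of A's incremental dict mutation.
--     def index(i, j):
--         return {a: {b: [row[1] for row in data_arr if row[i] == a and row[j] == b]
--                     for b in dict.fromkeys(row[j] for row in data_arr if row[i] == a)}
--                 for a in dict.fromkeys(row[i] for row in data_arr)}
--     return index(0, 2), index(2, 0)
-- ===== Notes on version B (the rewrite author's own statement) =====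
-- stated objective: alternative
-- what changed: A builds both nested indexes incrementally by mutating dicts inside one loop over the rows; B is a declarative group-by: it dedupes the outer and inner keys (dict.fromkeys, first-occurrence order) and computes each relation list by filtering data_arr, trading A's single pass for repeated scans.
-- outside the precondition, e.g. on get_ent_ent_rel([[1, 2]]): A raises IndexError, B raises IndexError
import Mathlib
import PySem

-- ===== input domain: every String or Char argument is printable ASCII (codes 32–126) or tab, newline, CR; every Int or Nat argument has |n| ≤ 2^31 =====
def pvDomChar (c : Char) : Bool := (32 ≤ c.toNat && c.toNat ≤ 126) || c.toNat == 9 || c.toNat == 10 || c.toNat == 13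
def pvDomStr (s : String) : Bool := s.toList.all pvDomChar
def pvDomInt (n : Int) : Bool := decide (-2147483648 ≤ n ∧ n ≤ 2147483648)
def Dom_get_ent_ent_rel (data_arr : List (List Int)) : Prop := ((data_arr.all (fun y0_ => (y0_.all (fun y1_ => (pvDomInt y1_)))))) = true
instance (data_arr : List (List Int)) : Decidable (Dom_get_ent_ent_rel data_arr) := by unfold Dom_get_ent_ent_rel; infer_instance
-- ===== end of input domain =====

-- B replaces A's incremental one-pass dict mutation by a declarative group-by (dedupe
-- keys, then gather each relation list by filtering); objective: alternative, not faster.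

-- Nested Dict → association-list convention at the return boundary (A's side only).
def pvToAssoc (d : PySem.Dict Int (PySem.Dict Int (List Int))) : List (Int × List (Int × List Int)) :=
  d.items.map (fun p => (p.1, p.2.items))

-- ===== PORT A =====
-- the symmetric per-row block A performs on each of the two dicts:
-- 'if k1 not in d: d[k1]={}', 'if k2 not in d[k1]: d[k1][k2]=[]', 'd[k1][k2].append(r)'
def pvStepA (d : PySem.Dict Int (PySem.Dict Int (List Int))) (k1 k2 r : Int) :
    PySem.Dict Int (PySem.Dict Int (List Int)) :=
  let d := if d.contains k1 then d else d.insert k1 PySem.Dict.empty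
  let d := if (d.getD k1 PySem.Dict.empty).contains k2 then d
           else d.insert k1 ((d.getD k1 PySem.Dict.empty).insert k2 [])
  d.modify k1 PySem.Dict.empty (fun inner => inner.modify k2 [] (· ++ [r]))

def get_ent_ent_rel (data_arr : List (List Int)) :
    (List (Int × List (Int × List Int))) × (List (Int × List (Int × List Int))) :=
  let st := data_arr.foldl
    (fun (st : PySem.Dict Int (PySem.Dict Int (List Int)) × PySem.Dict Int (PySem.Dict Int (List Int))) data =>
      let e1 := PySem.List.pyGetD data 0 0
      let r := PySem.List.pyGetD data 1 0
      let e2 := PySem.List.pyGetD data 2 0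
      (pvStepA st.1 e1 e2 r, pvStepA st.2 e2 e1 r))
    (PySem.Dict.empty, PySem.Dict.empty)
  (pvToAssoc st.1, pvToAssoc st.2)

-- ===== PORT B =====
-- Source B's 'index(i, j)': nested dict comprehension over dict.fromkeys-deduped keys,
-- each relation list a filtering comprehension over data_arr.
def pvIndex (data_arr : List (List Int)) (i j : Int) : List (Int × List (Int × List Int)) :=
  (PySem.List.dedup (data_arr.map (fun row => PySem.List.pyGetD row i 0))).map (fun a =>
    (a, (PySem.List.dedup ((data_arr.filter (fun row => PySem.List.pyGetD row i 0 == a)).map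
           (fun row => PySem.List.pyGetD row j 0))).map (fun b =>
      (b, (data_arr.filter (fun row =>
             PySem.List.pyGetD row i 0 == a && PySem.List.pyGetD row j 0 == b)).map
           (fun row => PySem.List.pyGetD row 1 0)))))

def get_ent_ent_rel_alt (data_arr : List (List Int)) :
    (List (Int × List (Int × List Int))) × (List (Int × List (Int × List Int))) :=
  (pvIndex data_arr 0 2, pvIndex data_arr 2 0)

-- ===== PRECONDITION & SPEC =====
-- Pre_ excludes only rows shorter than 3, where Python A raises IndexError (B raises there too).
def Pre_get_ent_ent_rel (data_arr : List (List Int)) : Prop :=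
  ∀ row ∈ data_arr, 3 ≤ row.length
instance (data_arr : List (List Int)) : Decidable (Pre_get_ent_ent_rel data_arr) := by
  unfold Pre_get_ent_ent_rel; infer_instance

def pvWitness_get_ent_ent_rel : List (List Int) := [[1, 2, 3], [3, 2, 1]]

def Spec_get_ent_ent_rel (data_arr : List (List Int)) (out : (List (Int × List (Int × List Int))) × (List (Int × List (Int × List Int)))) : Prop := out = get_ent_ent_rel_alt data_arr
instance (data_arr : List (List Int)) (out : (List (Int × List (Int × List Int))) × (List (Int × List (Int × List Int)))) : Decidable (Spec_get_ent_ent_rel data_arr out) := by unfold Spec_get_ent_ent_rel; infer_instance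

-- ===== CLAIM (what is proved, stated in full; the proofs are below) =====
def Claim_equal_get_ent_ent_rel : Prop := ∀ (data_arr : List (List Int)), Dom_get_ent_ent_rel data_arr → Pre_get_ent_ent_rel data_arr → Spec_get_ent_ent_rel data_arr (get_ent_ent_rel data_arr)

-- ===== LEMMAS AND PROOFS =====

-- A's guarded per-row block collapses to a single nested modify.
theorem pvStepA_eq_modify (d : PySem.Dict Int (PySem.Dict Int (List Int))) (k1 k2 r : Int) :
    pvStepA d k1 k2 r
      = d.modify k1 PySem.Dict.empty (fun inner => inner.modify k2 [] (· ++ [r])) := by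
  unfold pvStepA
  by_cases h1 : d.contains k1
  · by_cases h2 : (d.getD k1 PySem.Dict.empty).contains k2
    · simp [h1, h2]
    · simp [h1, h2, PySem.Dict.modify, PySem.Dict.getD_insert_self,
        PySem.Dict.insert_insert_self, PySem.Dict.getD_of_not_contains _ _ (by simpa using h2)]
  · simp [h1, PySem.Dict.modify, PySem.Dict.getD_insert_self, PySem.Dict.insert_insert_self,
      PySem.Dict.getD_of_not_contains _ _ (by simpa using h1)]

-- a modify-loop keyed by 'key', read back at c: only the rows with key = c act, in order.
theorem pvGetD_foldl_modify {ν : Type} (l : List (List Int)) (key : List Int → Int)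
    (d0 : ν) (g : List Int → ν → ν) (d : PySem.Dict Int ν) (c : Int) :
    (l.foldl (fun d x => d.modify (key x) d0 (g x)) d).getD c d0
      = (l.filter (fun x => key x == c)).foldl (fun acc x => g x acc) (d.getD c d0) := by
  induction l generalizing d with
  | nil => rfl
  | cons x l ih =>
    simp only [List.foldl_cons, ih, List.filter_cons]
    by_cases h : key x = c
    · subst h; simp [PySem.Dict.getD_modify_self]
    · simp [h, PySem.Dict.getD_modify, Ne.symm h]

-- the items of a nested modify-loop ARE B's group-by.
theorem pvMain (data : List (List Int)) (k1 k2 v : List Int → Int) :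
    pvToAssoc (data.foldl
      (fun d row => d.modify (k1 row) PySem.Dict.empty
        (fun inner => inner.modify (k2 row) [] (· ++ [v row]))) PySem.Dict.empty)
    = (PySem.List.dedup (data.map k1)).map (fun a =>
        (a, (PySem.List.dedup ((data.filter (fun r => k1 r == a)).map k2)).map (fun b =>
          (b, (data.filter (fun r => k1 r == a && k2 r == b)).map v)))) := by
  have hnd : (data.foldl
      (fun d row => d.modify (k1 row) PySem.Dict.empty
        (fun inner => inner.modify (k2 row) [] (· ++ [v row]))) PySem.Dict.empty).keys.Nodup :=
    PySem.Dict.nodup_keys_foldl_modify_key data k1 PySem.Dict.empty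
      (fun _ row inner => inner.modify (k2 row) [] (· ++ [v row])) PySem.Dict.empty
      (by simp [PySem.Dict.keys_empty])
  unfold pvToAssoc
  rw [PySem.Dict.items_eq_map_keys _ hnd PySem.Dict.empty,
      PySem.Dict.keys_foldl_modify_key data k1 PySem.Dict.empty
        (fun _ row inner => inner.modify (k2 row) [] (· ++ [v row])) PySem.Dict.empty]
  rw [show PySem.Set.update PySem.Dict.empty.keys (data.map k1)
        = PySem.List.dedup (data.map k1) from by
      simp [PySem.List.dedup_eq_ofList, PySem.Set.update, PySem.Set.ofList,
        PySem.Dict.keys_empty]]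
  simp only [List.map_map]
  apply List.map_congr_left
  intro a _
  simp only [Function.comp]
  refine Prod.ext rfl ?_
  rw [pvGetD_foldl_modify data k1 PySem.Dict.empty
        (fun row inner => inner.modify (k2 row) [] (· ++ [v row])) PySem.Dict.empty a,
      PySem.Dict.getD_empty]
  have hnd2 : ((data.filter (fun x => k1 x == a)).foldl
      (fun acc row => acc.modify (k2 row) [] (· ++ [v row])) PySem.Dict.empty).keys.Nodup :=
    PySem.Dict.nodup_keys_foldl_modify_key _ k2 []
      (fun _ row acc => acc ++ [v row]) PySem.Dict.empty (by simp [PySem.Dict.keys_empty])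
  rw [PySem.Dict.items_eq_map_keys _ hnd2 [],
      PySem.Dict.keys_foldl_modify_key _ k2 []
        (fun _ row acc => acc ++ [v row]) PySem.Dict.empty]
  rw [show PySem.Set.update PySem.Dict.empty.keys ((data.filter (fun x => k1 x == a)).map k2)
        = PySem.List.dedup ((data.filter (fun r => k1 r == a)).map k2) from by
      simp [PySem.List.dedup_eq_ofList, PySem.Set.update, PySem.Set.ofList,
        PySem.Dict.keys_empty]]
  apply List.map_congr_left
  intro b _
  refine Prod.ext rfl ?_
  rw [pvGetD_foldl_modify _ k2 [] (fun row acc => acc ++ [v row]) PySem.Dict.empty b,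
      PySem.Dict.getD_empty, PySem.List.foldl_append_singleton_eq_map, List.filter_filter]
  simp only [List.nil_append]
  exact congrArg (List.map v) (List.filter_congr (fun r _ => Bool.and_comm _ _))

-- ===== VERDICT (by name: the statement is the Claim_ definition above) =====
theorem get_ent_ent_rel_spec : Claim_equal_get_ent_ent_rel := by
  intro data_arr _ _
  unfold Spec_get_ent_ent_rel get_ent_ent_rel get_ent_ent_rel_alt pvIndex
  rw [show
      (fun (st : PySem.Dict Int (PySem.Dict Int (List Int)) × PySem.Dict Int (PySem.Dict Int (List Int))) data =>
        let e1 := PySem.List.pyGetD data 0 0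
        let r := PySem.List.pyGetD data 1 0
        let e2 := PySem.List.pyGetD data 2 0
        (pvStepA st.1 e1 e2 r, pvStepA st.2 e2 e1 r))
    = (fun st data =>
        (st.1.modify (PySem.List.pyGetD data 0 0) PySem.Dict.empty
          (fun inner => inner.modify (PySem.List.pyGetD data 2 0) [] (· ++ [PySem.List.pyGetD data 1 0])),
         st.2.modify (PySem.List.pyGetD data 2 0) PySem.Dict.empty
          (fun inner => inner.modify (PySem.List.pyGetD data 0 0) [] (· ++ [PySem.List.pyGetD data 1 0]))))
    from by funext st data; simp only [pvStepA_eq_modify]]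
  rw [PySem.List.foldl_prod_mk
    (fun (d : PySem.Dict Int (PySem.Dict Int (List Int))) data =>
      d.modify (PySem.List.pyGetD data 0 0) PySem.Dict.empty
        (fun inner => inner.modify (PySem.List.pyGetD data 2 0) [] (· ++ [PySem.List.pyGetD data 1 0])))
    (fun (d : PySem.Dict Int (PySem.Dict Int (List Int))) data =>
      d.modify (PySem.List.pyGetD data 2 0) PySem.Dict.empty
        (fun inner => inner.modify (PySem.List.pyGetD data 0 0) [] (· ++ [PySem.List.pyGetD data 1 0])))
    data_arr PySem.Dict.empty PySem.Dict.empty]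
  simp only [pvMain]
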